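-- pv_equiv track=rewrite | github.com/sophiafe/pulse-agents | src/util/model_util.py | extract_last_json_block
-- ===== SOURCE A (Python) =====
-- from typing import Any, Dict, List, Optional, Tuple
--
-- def extract_last_json_block(text: str) -> Optional[str]:
--     """Extract the last balanced JSON object from the input string."""
--     stack = []
--     start_idx = None
--
--     for i, c in enumerate(reversed(text)):
--         idx = len(text) - 1 - i
--         if c == "}":
--             if not stack:
--                 start_idx = idx
--             stack.append("}")
--         elif c == "{":
--             if stack:
--                 stack.pop()
--                 if not stack and start_idx is not None:
--                     return text[idx : start_idx + 1]
--     return None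
-- ===== SOURCE B (Python) =====
-- def extract_last_json_block(text):
--     """Extract the last balanced JSON object from the input string."""
--     stack = []  # indices of currently unmatched '{'
--     ans = None  # match for the most recent '}' seen so far (or None if it was unmatched)
--     for i, c in enumerate(text):
--         if c == "{":
--             stack.append(i)
--         elif c == "}":
--             ans = (stack.pop(), i) if stack else None
--     return None if ans is None else text[ans[0] : ans[1] + 1]
-- ===== Notes on version B (the rewrite author's own statement) =====
-- stated objective: faster
-- what changed: A scans the string backwards via reversed enumeration with a stack of close-brace markers, recomputing an index each step; B makes one plain forward pass keeping a stack of open-brace indices and, at each close brace, records (or clears) the match of the most recent close, slicing once at the end.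
import Mathlib
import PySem

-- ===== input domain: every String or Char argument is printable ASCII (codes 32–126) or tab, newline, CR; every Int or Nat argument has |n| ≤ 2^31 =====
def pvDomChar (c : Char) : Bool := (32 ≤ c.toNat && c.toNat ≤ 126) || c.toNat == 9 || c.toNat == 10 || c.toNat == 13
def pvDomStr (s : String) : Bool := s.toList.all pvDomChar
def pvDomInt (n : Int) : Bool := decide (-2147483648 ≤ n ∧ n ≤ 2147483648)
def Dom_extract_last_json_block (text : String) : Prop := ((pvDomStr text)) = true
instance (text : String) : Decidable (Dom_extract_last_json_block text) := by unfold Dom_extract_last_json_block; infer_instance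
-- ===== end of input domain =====

-- B replaces A's backward scan (reversed enumeration, stack of close-brace markers,
-- per-step index arithmetic, early return) by a single plain forward pass keeping a
-- stack of open-brace indices and the match of the most recent close brace; measurably
-- faster by a constant factor (fewer per-character operations).


-- ===== PORT A =====
-- A's loop over `enumerate(reversed(text))`; the early `return` is the `some` branch.
-- A's stack holds only the literal '}', so append/pop at the end is ported as cons/tail.
def pvAGo (text : List Char) (l : List Char) (i : Nat) (stack : List Char)
    (startIdx : Option Int) : Option String :=
  match l with
  | [] => none
  | c :: rest =>
    let idx : Int := (text.length : Int) - 1 - (i : Int)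
    if c = '}' then
      let startIdx := if stack.isEmpty then some idx else startIdx
      pvAGo text rest (i + 1) ('}' :: stack) startIdx
    else if c = '{' then
      match stack with
      | [] => pvAGo text rest (i + 1) [] startIdx
      | _ :: stack' =>
        match stack', startIdx with
        | [], some s => some (String.ofList (PySem.List.slice text (some idx) (some (s + 1))))
        | _, _ => pvAGo text rest (i + 1) stack' startIdx
    else pvAGo text rest (i + 1) stack startIdx

def extract_last_json_block (text : String) : Option String :=
  pvAGo text.toList text.toList.reverse 0 [] none

-- ===== PORT B =====
-- B's loop body: state = (stack of open-brace indices, match of the latest '}').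
def pvBStep (st : List Int × Option (Int × Int)) (ic : Int × Char) :
    List Int × Option (Int × Int) :=
  if ic.2 = '{' then (st.1 ++ [ic.1], st.2)
  else if ic.2 = '}' then
    match st.1.getLast? with
    | some t => (st.1.dropLast, some (t, ic.1))
    | none => (st.1, none)
  else st

def extract_last_json_block_alt (text : String) : Option String :=
  let st := (PySem.List.enumerate text.toList 0).foldl pvBStep ([], none)
  match st.2 with
  | none => none
  | some (a, b) => some (String.ofList (PySem.List.slice text.toList (some a) (some (b + 1))))

-- ===== PRECONDITION & SPEC =====
def Spec_extract_last_json_block (text : String) (out : Option String) : Prop := out = extract_last_json_block_alt text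
instance (text : String) (out : Option String) : Decidable (Spec_extract_last_json_block text out) := by unfold Spec_extract_last_json_block; infer_instance

-- ===== CLAIM (what is proved, stated in full; the proofs are below) =====
def Claim_equal_extract_last_json_block : Prop := ∀ (text : String), Dom_extract_last_json_block text → Spec_extract_last_json_block text (extract_last_json_block text)

-- ===== LEMMAS AND PROOFS =====

-- `dcnt ds k` = (#'}' − #'{') in `ds.drop k`; A's backward stack size at boundary k.
def dcnt (ds : List Char) (k : Nat) : Int :=
  ((ds.drop k).count '}' : Int) - ((ds.drop k).count '{' : Int)

-- largest k with dcnt ds k = -g (the boundary where A's backward scan, started with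
-- stack size g, first empties), as a reference value both ports are compared against
def maxk (ds : List Char) (g : Nat) : Option Nat :=
  (List.range (ds.length + 1)).reverse.find? (fun k => dcnt ds k = -(g : Int))

theorem dcnt_length (ds : List Char) : dcnt ds ds.length = 0 := by
  simp [dcnt]

theorem dcnt_append (ds : List Char) (c : Char) (k : Nat) (hk : k ≤ ds.length) :
    dcnt (ds ++ [c]) k =
      dcnt ds k + (if c = '}' then 1 else if c = '{' then -1 else 0) := by
  unfold dcnt
  rw [List.drop_append_of_le_length hk]
  by_cases h1 : c = '}' <;> by_cases h2 : c = '{' <;>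
    simp [h1, h2, List.count_append] <;> ring

theorem find?_congr {α : Type} (l : List α) (p q : α → Bool)
    (h : ∀ x ∈ l, p x = q x) : l.find? p = l.find? q := by
  induction l with
  | nil => rfl
  | cons a t ih =>
    simp only [List.find?_cons, h a (by simp)]
    cases q a
    · exact ih (fun x hx => h x (by simp [hx]))
    · rfl

theorem maxk_append_raw (ds : List Char) (c : Char) (g : Nat) (hg : 1 ≤ g) (d : Int)
    (hd : d = (if c = '}' then 1 else if c = '{' then -1 else 0)) :
    maxk (ds ++ [c]) g =
      (List.range (ds.length + 1)).reverse.find? (fun k => decide (dcnt ds k = -(g : Int) - d)) := by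
  unfold maxk
  have hlen : (ds ++ [c]).length = ds.length + 1 := by simp
  rw [hlen, List.range_succ, List.reverse_append]
  simp only [List.reverse_singleton, List.singleton_append, List.find?_cons]
  have h0 : dcnt (ds ++ [c]) (ds.length + 1) = 0 := by
    have := dcnt_length (ds ++ [c]); simpa using this
  have hne : (decide (dcnt (ds ++ [c]) (ds.length + 1) = -(g : Int))) = false := by
    rw [decide_eq_false_iff_not, h0]; omega
  rw [hne]
  apply find?_congr
  intro k hk
  have hk' : k ≤ ds.length := by
    have := List.mem_range.mp (List.mem_reverse.mp hk); omega
  rw [decide_eq_decide, dcnt_append ds c k hk', hd]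
  omega

theorem maxk_append_close (ds : List Char) (g : Nat) (hg : 1 ≤ g) :
    maxk (ds ++ ['}']) g = maxk ds (g + 1) := by
  rw [maxk_append_raw ds '}' g hg 1 (by simp)]
  unfold maxk
  apply find?_congr
  intro k _
  rw [decide_eq_decide]
  omega

theorem maxk_append_open_one (ds : List Char) :
    maxk (ds ++ ['{']) 1 = some ds.length := by
  rw [maxk_append_raw ds '{' 1 (by omega) (-1) (by simp)]
  rw [List.range_succ, List.reverse_append]
  simp only [List.reverse_singleton, List.singleton_append, List.find?_cons]
  have : (decide (dcnt ds ds.length = -((1 : Nat) : Int) - (-1))) = true := by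
    rw [decide_eq_true_iff, dcnt_length]; omega
  rw [this]

theorem maxk_append_open (ds : List Char) (g : Nat) (hg : 1 ≤ g) :
    maxk (ds ++ ['{']) (g + 1) = maxk ds g := by
  rw [maxk_append_raw ds '{' (g + 1) (by omega) (-1) (by simp)]
  unfold maxk
  apply find?_congr
  intro k _
  rw [decide_eq_decide]
  omega

theorem maxk_append_other (ds : List Char) (c : Char) (g : Nat) (hg : 1 ≤ g)
    (h1 : c ≠ '}') (h2 : c ≠ '{') :
    maxk (ds ++ [c]) g = maxk ds g := by
  rw [maxk_append_raw ds c g hg 0 (by simp [h1, h2])]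
  unfold maxk
  apply find?_congr
  intro k _
  rw [decide_eq_decide]
  omega

theorem maxk_nil (g : Nat) (hg : 1 ≤ g) : maxk [] g = none := by
  unfold maxk
  simp only [List.length_nil, List.range_succ, List.range_zero, List.nil_append,
    List.reverse_singleton, List.find?_cons, List.find?_nil]
  have : (decide (dcnt [] 0 = -(g : Int))) = false := by
    rw [decide_eq_false_iff_not, dcnt]; simp; omega
  rw [this]

-- ===== A-side characterisation =====

theorem pvAGo_skip (text : List Char) (rl l : List Char) (i : Nat)
    (h : ∀ c ∈ rl, c ≠ '}') :
    pvAGo text (rl ++ l) i [] none = pvAGo text l (i + rl.length) [] none := by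
  induction rl generalizing i with
  | nil => simp
  | cons c t ih =>
    have hc : c ≠ '}' := h c (by simp)
    by_cases h2 : c = '{'
    · simp only [List.cons_append, pvAGo, if_neg hc, if_pos h2]
      rw [ih (i + 1) (fun x hx => h x (by simp [hx]))]
      congr 1; simp; omega
    · simp only [List.cons_append, pvAGo, if_neg hc, if_neg h2]
      rw [ih (i + 1) (fun x hx => h x (by simp [hx]))]
      congr 1; simp; omega

theorem pvAGo_back (text : List Char) (ds : List Char) (i g : Nat) (j : Int)
    (hg : 1 ≤ g) (hi : i + ds.length = text.length) :
    pvAGo text ds.reverse i (List.replicate g '}') (some j) =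
      (maxk ds g).map (fun k =>
        String.ofList (PySem.List.slice text (some (k : Int)) (some (j + 1)))) := by
  induction ds using List.reverseRecOn generalizing i g with
  | nil => simp [pvAGo, maxk_nil g hg]
  | append_singleton ds' c ih =>
    rw [List.reverse_append]
    simp only [List.reverse_singleton, List.singleton_append]
    have hlen : (ds' ++ [c]).length = ds'.length + 1 := by simp
    rw [hlen] at hi
    have hidx : (text.length : Int) - 1 - (i : Int) = (ds'.length : Int) := by omega
    by_cases h1 : c = '}'
    · simp only [pvAGo, if_pos h1]
      have hrep : ('}' :: List.replicate g '}') = List.replicate (g + 1) '}' := by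
        simp [List.replicate_succ]
      have hne : (List.replicate g '}').isEmpty = false := by
        cases g with
        | zero => omega
        | succ n => simp [List.replicate_succ]
      rw [hne]
      simp only [Bool.false_eq_true, if_false, hrep]
      rw [ih (i + 1) (g + 1) (by omega) (by omega), h1, maxk_append_close ds' g hg]
    · by_cases h2 : c = '{'
      · simp only [pvAGo, if_neg h1, if_pos h2]
        cases g with
        | zero => omega
        | succ g' =>
          rw [List.replicate_succ]
          cases g' with
          | zero =>
            simp only [List.replicate_zero]
            rw [h2, maxk_append_open_one ds']
            simp [hidx]
          | succ g'' =>
            have hne2 : List.replicate (g'' + 1) '}' ≠ ([] : List Char) := by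
              simp [List.replicate_succ]
            simp only []
            rw [h2, maxk_append_open ds' (g'' + 1) (by omega)]
            rw [← ih (i + 1) (g'' + 1) (by omega) (by omega)]
            cases hrep : List.replicate (g'' + 1) '}' with
            | nil => exact absurd hrep hne2
            | cons a t => simp
      · simp only [pvAGo, if_neg h1, if_neg h2]
        rw [ih (i + 1) g hg (by omega)]
        rw [maxk_append_other ds' c g hg h1 h2]

-- ===== B-side characterisation =====

-- the stack invariant: after folding `ds`, the t-th element of the stack counted from
-- the top (= reversed, since Python appends/pops at the end) is `maxk ds (t+1)`
theorem pvB_stack_inv (ds : List Char) :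
    ∀ t : Nat,
      (((PySem.List.enumerate ds 0).foldl pvBStep ([], none)).1.reverse)[t]? =
        (maxk ds (t + 1)).map (fun k => (k : Int)) := by
  induction ds using List.reverseRecOn with
  | nil => intro t; rw [maxk_nil (t + 1) (by omega)]; simp [PySem.List.enumerate_nil]
  | append_singleton ds' c ih =>
    intro t
    rw [PySem.List.enumerate_append, List.foldl_append]
    simp only [PySem.List.enumerate_cons, PySem.List.enumerate_nil, List.foldl_cons,
      List.foldl_nil]
    set st := (PySem.List.enumerate ds' 0).foldl pvBStep ([], none) with hst
    by_cases h2 : c = '{'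
    · have hstep : pvBStep st (0 + (ds'.length : Int), c) =
          (st.1 ++ [0 + (ds'.length : Int)], st.2) := by
        simp only [pvBStep]; rw [if_pos (by simp [h2])]
      rw [hstep]
      cases t with
      | zero =>
        rw [h2, maxk_append_open_one ds']
        simp
      | succ t' =>
        rw [h2, maxk_append_open ds' (t' + 1) (by omega), ← ih t']
        simp
    · by_cases h1 : c = '}'
      · have hstep : pvBStep st (0 + (ds'.length : Int), c) =
            (match st.1.getLast? with
             | some v => (st.1.dropLast, some (v, 0 + (ds'.length : Int)))
             | none => (st.1, none)) := by
          simp only [pvBStep]; rw [if_neg (by simp [h2]), if_pos (by simp [h1])]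
        rw [hstep, h1, maxk_append_close ds' (t + 1) (by omega)]
        cases hlast : st.1.getLast? with
        | none =>
          have hnil : st.1 = [] := List.getLast?_eq_none_iff.mp hlast
          have h' := ih (t + 1)
          rw [hnil] at h'
          simp only [List.reverse_nil, List.getElem?_nil] at h'
          rw [hnil]
          simp only [List.reverse_nil, List.getElem?_nil]
          exact h'
        | some v =>
          have hdrop : st.1.dropLast.reverse = st.1.reverse.tail :=
            Eq.symm List.tail_reverse
          simp only []
          rw [hdrop, List.getElem?_tail]
          exact ih (t + 1)
      · have hstep : pvBStep st (0 + (ds'.length : Int), c) = st := by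
          simp only [pvBStep]; rw [if_neg (by simp [h2]), if_neg (by simp [h1])]
        rw [hstep, maxk_append_other ds' c (t + 1) (by omega) h1 h2]
        exact ih t

-- folding pairs whose char is not '}' never changes the answer component
theorem pvB_ans_stable (l : List (Int × Char)) (st : List Int × Option (Int × Int))
    (h : ∀ p ∈ l, p.2 ≠ '}') : (l.foldl pvBStep st).2 = st.2 := by
  induction l generalizing st with
  | nil => rfl
  | cons p t ih =>
    rw [List.foldl_cons]
    rw [ih _ (fun q hq => h q (by simp [hq]))]
    by_cases h2 : p.2 = '{'
    · simp [pvBStep, h2]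
    · simp [pvBStep, h2, h p (by simp)]

-- every string splits as: no '}' at all, or ds ++ '}' :: es with no '}' in es
theorem last_close_split (cs : List Char) :
    (∀ c ∈ cs, c ≠ '}') ∨
      ∃ ds es, cs = ds ++ '}' :: es ∧ ∀ c ∈ es, c ≠ '}' := by
  induction cs using List.reverseRecOn with
  | nil => left; simp
  | append_singleton ds' c ih =>
    by_cases h1 : c = '}'
    · right; exact ⟨ds', [], by simp [h1], by simp⟩
    · cases ih with
      | inl h => left; intro x hx; rcases List.mem_append.mp hx with h' | h'
                 · exact h x h'
                 · simp at h'; simpa [h'] using h1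
      | inr h =>
        rcases h with ⟨ds, es, heq, hes⟩
        right
        refine ⟨ds, es ++ [c], by simp [heq], ?_⟩
        intro x hx
        rcases List.mem_append.mp hx with h' | h'
        · exact hes x h'
        · simp at h'; simpa [h'] using h1

-- the two ports agree on every character list
theorem main_list (cs : List Char) :
    pvAGo cs cs.reverse 0 [] none =
      (match ((PySem.List.enumerate cs 0).foldl pvBStep ([], none)).2 with
       | none => none
       | some (a, b) => some (String.ofList (PySem.List.slice cs (some a) (some (b + 1))))) := by
  rcases last_close_split cs with h | ⟨ds, es, heq, hes⟩
  · -- no '}' anywhere: both return none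
    have hA : pvAGo cs cs.reverse 0 [] none = none := by
      have := pvAGo_skip cs cs.reverse [] 0 (fun c hc => h c (List.mem_reverse.mp hc))
      simpa [pvAGo] using this
    have hB : ((PySem.List.enumerate cs 0).foldl pvBStep ([], none)).2 = none := by
      rw [pvB_ans_stable]
      intro p hp
      rcases (PySem.List.mem_enumerate_iff _ _ _).mp hp with ⟨k, hk, rfl⟩
      exact h _ (List.getElem_mem hk)
    rw [hA, hB]
  · have hlen : cs.length = ds.length + 1 + es.length := by simp [heq]; omega
    -- A side
    have hrev : cs.reverse = es.reverse ++ ('}' :: ds.reverse) := by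
      rw [heq]; simp
    have hA : pvAGo cs cs.reverse 0 [] none =
        (maxk ds 1).map (fun k =>
          String.ofList (PySem.List.slice cs (some (k : Int)) (some ((ds.length : Int) + 1)))) := by
      rw [hrev, pvAGo_skip cs es.reverse _ 0 (fun c hc => hes c (List.mem_reverse.mp hc))]
      have hidx : (cs.length : Int) - 1 - ((0 + es.reverse.length : Nat) : Int) = (ds.length : Int) := by
        simp [hlen]; omega
      simp only [pvAGo, if_pos rfl, List.isEmpty_nil, hidx]
      have := pvAGo_back cs ds (0 + es.reverse.length + 1) 1 ((ds.length : Int)) (by omega)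
        (by simp [hlen]; omega)
      simpa [List.replicate_succ] using this
    -- B side
    have hB : ((PySem.List.enumerate cs 0).foldl pvBStep ([], none)).2 =
        (maxk ds 1).map (fun k => ((k : Int), (ds.length : Int))) := by
      rw [heq, PySem.List.enumerate_append, PySem.List.enumerate_cons, List.foldl_append,
        List.foldl_cons]
      rw [pvB_ans_stable _ _ (by
        intro p hp
        rcases (PySem.List.mem_enumerate_iff _ _ _).mp hp with ⟨k, hk, rfl⟩
        exact hes _ (List.getElem_mem hk))]
      set st := (PySem.List.enumerate ds 0).foldl pvBStep ([], none) with hst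
      have hhead : st.1.getLast? = (maxk ds 1).map (fun k => (k : Int)) := by
        rw [List.getLast?_eq_head?_reverse, List.head?_eq_getElem?]
        exact pvB_stack_inv ds 0
      have hstep : pvBStep st (0 + (ds.length : Int), '}') =
          (match st.1.getLast? with
           | some v => (st.1.dropLast, some (v, 0 + (ds.length : Int)))
           | none => (st.1, none)) := by
        simp only [pvBStep]; rw [if_neg (by simp), if_pos (by simp)]
      rw [hstep, hhead]
      cases maxk ds 1 with
      | none => simp
      | some k => simp
    rw [hA, hB]
    cases maxk ds 1 with
    | none => rfl
    | some k => simp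

-- ===== VERDICT (by name: the statement is the Claim_ definition above) =====
theorem extract_last_json_block_spec : Claim_equal_extract_last_json_block := by
  intro text _
  unfold Spec_extract_last_json_block extract_last_json_block extract_last_json_block_alt
  exact main_list text.toList
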